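-- pv_equiv track=rewrite | github.com/cynos28/ganithamithura | symbol-service/src/prompts/ai_question_prompts.py | _get_example_for_operations
-- ===== SOURCE A (Python) =====
-- def _get_example_for_operations(operations: list, operand_min: int, operand_max: int) -> str:
--     """
--     Get an example question based on allowed operations.
--
--     Args:
--         operations: List of allowed operations
--         operand_min: Minimum operand value
--         operand_max: Maximum operand value
--
--     Returns:
--         JSON example string
--     """
--     # Filter out 'brackets' as we don't support complex expressions
--     simple_ops = [op for op in operations if op != 'brackets']
--     op = simple_ops[0] if simple_ops else 'addition'
--
--     if op == 'addition':
--         a = max(operand_min, min(10, operand_max))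
--         b = max(operand_min, min(8, operand_max))
--         return f'{{"question": "Maya has {a} toys. Her friend gives her {b} more. How many toys does Maya have now?", "expression": "{a} + {b}", "answer": {a + b}}}'
--     elif op == 'subtraction':
--         a = max(operand_min, min(15, operand_max))
--         b = max(operand_min, min(7, operand_max))
--         return f'{{"question": "There are {a} birds on a tree. {b} birds fly away. How many birds are left?", "expression": "{a} - {b}", "answer": {a - b}}}'
--     elif op == 'multiplication':
--         a = max(operand_min, min(8, operand_max))
--         b = max(operand_min, min(6, operand_max))
--         return f'{{"question": "Each basket has {a} apples. There are {b} baskets. How many apples in total?", "expression": "{a} × {b}", "answer": {a * b}}}'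
--     elif op == 'three_addend':
--         a = max(operand_min, min(5, operand_max))
--         b = max(operand_min, min(4, operand_max))
--         c = max(operand_min, min(3, operand_max))
--         return f'{{"question": "John has {a} red balls, {b} blue balls, and {c} yellow balls. How many balls does John have?", "expression": "{a} + {b} + {c}", "answer": {a + b + c}}}'
--     elif op == 'missing_addend':
--         answer = max(operand_min, min(10, operand_max))
--         a = max(operand_min, min(6, operand_max))
--         unknown = max(0, answer - a)
--         return f'{{"question": "Sarah has some candies. She gets {a} more candies and now has {answer} total. How many candies did she have at first?", "expression": "□ + {a} = {answer}", "answer": {unknown}}}'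
--     else:
--         return f'{{"question": "Tom has 2 apples. He gets 2 more. How many apples does Tom have?", "expression": "2 + 2", "answer": 4}}'
-- ===== SOURCE B (Python) =====
-- # Data-driven re-implementation: each operation is a data row (operand caps, an
-- # answer mode, and a token template of literals and value slots); one generic
-- # renderer clamps the caps and interleaves the template.
--
-- _TABLE = {
--     'addition': (
--         [10, 8], 'sum',
--         ['{"question": "Maya has ', 0, ' toys. Her friend gives her ', 1,
--          ' more. How many toys does Maya have now?", "expression": "', 0, ' + ', 1,
--          '", "answer": ', 2, '}'],
--     ),
--     'subtraction': (
--         [15, 7], 'sub',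
--         ['{"question": "There are ', 0, ' birds on a tree. ', 1,
--          ' birds fly away. How many birds are left?", "expression": "', 0, ' - ', 1,
--          '", "answer": ', 2, '}'],
--     ),
--     'multiplication': (
--         [8, 6], 'mul',
--         ['{"question": "Each basket has ', 0, ' apples. There are ', 1,
--          ' baskets. How many apples in total?", "expression": "', 0, ' \u00d7 ', 1,
--          '", "answer": ', 2, '}'],
--     ),
--     'three_addend': (
--         [5, 4, 3], 'sum',
--         ['{"question": "John has ', 0, ' red balls, ', 1, ' blue balls, and ', 2,
--          ' yellow balls. How many balls does John have?", "expression": "', 0, ' + ', 1,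
--          ' + ', 2, '", "answer": ', 3, '}'],
--     ),
--     'missing_addend': (
--         [10, 6], 'gap',
--         ['{"question": "Sarah has some candies. She gets ', 1,
--          ' more candies and now has ', 0,
--          ' total. How many candies did she have at first?", "expression": "\u25a1 + ', 1,
--          ' = ', 0, '", "answer": ', 2, '}'],
--     ),
-- }
--
-- _DEFAULT = (
--     [], 'sum',
--     ['{"question": "Tom has 2 apples. He gets 2 more. How many apples does Tom have?", '
--      '"expression": "2 + 2", "answer": 4}'],
-- )
--
--
-- def _render(row, lo, hi):
--     caps, mode, tokens = row
--     vals = [max(lo, min(c, hi)) for c in caps]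
--     if mode == 'sum':
--         ans = sum(vals)
--     elif mode == 'sub':
--         ans = vals[0] - vals[1]
--     elif mode == 'mul':
--         ans = vals[0] * vals[1]
--     else:  # 'gap'
--         ans = max(0, vals[0] - vals[1])
--     vals.append(ans)
--     return ''.join(t if isinstance(t, str) else str(vals[t]) for t in tokens)
--
--
-- def _get_example_for_operations(operations: list, operand_min: int, operand_max: int) -> str:
--     op = next((o for o in operations if o != 'brackets'), 'addition')
--     return _render(_TABLE.get(op, _DEFAULT), operand_min, operand_max)
-- ===== Notes on version B (the rewrite author's own statement) =====
-- stated objective: alternative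
-- what changed: Replaces A's six-way if/elif chain of inlined formatted strings by a data-driven design: a table maps each operation to a row (operand caps, answer mode, token template of literals and value slots) and one generic renderer clamps the caps, computes the answer by mode, and joins the template.
import Mathlib
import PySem

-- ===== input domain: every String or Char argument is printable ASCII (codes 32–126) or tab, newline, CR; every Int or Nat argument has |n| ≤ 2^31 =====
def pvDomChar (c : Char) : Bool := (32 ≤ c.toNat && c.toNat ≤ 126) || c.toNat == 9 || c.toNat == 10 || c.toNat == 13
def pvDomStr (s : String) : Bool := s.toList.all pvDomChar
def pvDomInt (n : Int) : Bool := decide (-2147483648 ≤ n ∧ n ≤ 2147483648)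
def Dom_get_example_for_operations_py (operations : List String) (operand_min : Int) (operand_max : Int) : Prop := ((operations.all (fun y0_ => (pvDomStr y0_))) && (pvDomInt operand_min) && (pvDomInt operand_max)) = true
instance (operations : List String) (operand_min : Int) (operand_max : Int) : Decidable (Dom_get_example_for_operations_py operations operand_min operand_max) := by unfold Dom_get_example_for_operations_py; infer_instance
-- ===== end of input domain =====

-- B replaces A's if/elif chain of inlined format strings by a data table
-- (caps, answer mode, token template) plus one generic renderer; objective: alternative.

-- ===== PORT A =====
def get_example_for_operations_py (operations : List String) (operand_min : Int) (operand_max : Int) : String :=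
  let simple_ops := operations.filter (fun op => op != "brackets")
  let op := match simple_ops with
    | [] => "addition"
    | x :: _ => x
  if op == "addition" then
    let a := max operand_min (min 10 operand_max)
    let b := max operand_min (min 8 operand_max)
    "{\"question\": \"Maya has " ++ PySem.Int.toStr a ++ " toys. Her friend gives her " ++ PySem.Int.toStr b ++ " more. How many toys does Maya have now?\", \"expression\": \"" ++ PySem.Int.toStr a ++ " + " ++ PySem.Int.toStr b ++ "\", \"answer\": " ++ PySem.Int.toStr (a + b) ++ "}"
  else if op == "subtraction" then
    let a := max operand_min (min 15 operand_max)
    let b := max operand_min (min 7 operand_max)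
    "{\"question\": \"There are " ++ PySem.Int.toStr a ++ " birds on a tree. " ++ PySem.Int.toStr b ++ " birds fly away. How many birds are left?\", \"expression\": \"" ++ PySem.Int.toStr a ++ " - " ++ PySem.Int.toStr b ++ "\", \"answer\": " ++ PySem.Int.toStr (a - b) ++ "}"
  else if op == "multiplication" then
    let a := max operand_min (min 8 operand_max)
    let b := max operand_min (min 6 operand_max)
    "{\"question\": \"Each basket has " ++ PySem.Int.toStr a ++ " apples. There are " ++ PySem.Int.toStr b ++ " baskets. How many apples in total?\", \"expression\": \"" ++ PySem.Int.toStr a ++ " × " ++ PySem.Int.toStr b ++ "\", \"answer\": " ++ PySem.Int.toStr (a * b) ++ "}"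
  else if op == "three_addend" then
    let a := max operand_min (min 5 operand_max)
    let b := max operand_min (min 4 operand_max)
    let c := max operand_min (min 3 operand_max)
    "{\"question\": \"John has " ++ PySem.Int.toStr a ++ " red balls, " ++ PySem.Int.toStr b ++ " blue balls, and " ++ PySem.Int.toStr c ++ " yellow balls. How many balls does John have?\", \"expression\": \"" ++ PySem.Int.toStr a ++ " + " ++ PySem.Int.toStr b ++ " + " ++ PySem.Int.toStr c ++ "\", \"answer\": " ++ PySem.Int.toStr (a + b + c) ++ "}"
  else if op == "missing_addend" then
    let answer := max operand_min (min 10 operand_max)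
    let a := max operand_min (min 6 operand_max)
    let unknown := max 0 (answer - a)
    "{\"question\": \"Sarah has some candies. She gets " ++ PySem.Int.toStr a ++ " more candies and now has " ++ PySem.Int.toStr answer ++ " total. How many candies did she have at first?\", \"expression\": \"□ + " ++ PySem.Int.toStr a ++ " = " ++ PySem.Int.toStr answer ++ "\", \"answer\": " ++ PySem.Int.toStr unknown ++ "}"
  else
    "{\"question\": \"Tom has 2 apples. He gets 2 more. How many apples does Tom have?\", \"expression\": \"2 + 2\", \"answer\": 4}"

-- ===== PORT B =====
-- a template token: a literal piece or a slot index into the value list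
inductive PvTok where
  | lit : String → PvTok
  | slot : Nat → PvTok
deriving DecidableEq, Repr

-- a table row: operand caps, answer mode, token template
def PvRow : Type := List Int × String × List PvTok

def pvTable : List (String × PvRow) :=
  [("addition", ([10, 8], "sum",
      [.lit "{\"question\": \"Maya has ", .slot 0, .lit " toys. Her friend gives her ", .slot 1,
       .lit " more. How many toys does Maya have now?\", \"expression\": \"", .slot 0, .lit " + ", .slot 1,
       .lit "\", \"answer\": ", .slot 2, .lit "}"])),
   ("subtraction", ([15, 7], "sub",
      [.lit "{\"question\": \"There are ", .slot 0, .lit " birds on a tree. ", .slot 1,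
       .lit " birds fly away. How many birds are left?\", \"expression\": \"", .slot 0, .lit " - ", .slot 1,
       .lit "\", \"answer\": ", .slot 2, .lit "}"])),
   ("multiplication", ([8, 6], "mul",
      [.lit "{\"question\": \"Each basket has ", .slot 0, .lit " apples. There are ", .slot 1,
       .lit " baskets. How many apples in total?\", \"expression\": \"", .slot 0, .lit " × ", .slot 1,
       .lit "\", \"answer\": ", .slot 2, .lit "}"])),
   ("three_addend", ([5, 4, 3], "sum",
      [.lit "{\"question\": \"John has ", .slot 0, .lit " red balls, ", .slot 1, .lit " blue balls, and ", .slot 2,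
       .lit " yellow balls. How many balls does John have?\", \"expression\": \"", .slot 0, .lit " + ", .slot 1,
       .lit " + ", .slot 2, .lit "\", \"answer\": ", .slot 3, .lit "}"])),
   ("missing_addend", ([10, 6], "gap",
      [.lit "{\"question\": \"Sarah has some candies. She gets ", .slot 1,
       .lit " more candies and now has ", .slot 0,
       .lit " total. How many candies did she have at first?\", \"expression\": \"□ + ", .slot 1,
       .lit " = ", .slot 0, .lit "\", \"answer\": ", .slot 2, .lit "}"]))]

def pvDefaultRow : PvRow :=
  ([], "sum",
   [.lit "{\"question\": \"Tom has 2 apples. He gets 2 more. How many apples does Tom have?\", \"expression\": \"2 + 2\", \"answer\": 4}"])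

def pvRender (row : PvRow) (lo hi : Int) : String :=
  let vals := row.1.map (fun c => max lo (min c hi))
  let mode := row.2.1
  let ans :=
    if mode == "sum" then vals.sum
    else if mode == "sub" then vals.getD 0 0 - vals.getD 1 0
    else if mode == "mul" then vals.getD 0 0 * vals.getD 1 0
    else max 0 (vals.getD 0 0 - vals.getD 1 0)
  let ext := vals ++ [ans]
  row.2.2.foldl (fun acc t =>
    acc ++ match t with
      | .lit s => s
      | .slot i => PySem.Int.toStr (ext.getD i 0)) ""

def get_example_for_operations_py_alt (operations : List String) (operand_min : Int) (operand_max : Int) : String :=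
  let op := (operations.find? (fun o => o != "brackets")).getD "addition"
  pvRender (((pvTable.find? (fun p => p.1 == op)).map Prod.snd).getD pvDefaultRow) operand_min operand_max

-- ===== PRECONDITION & SPEC =====
def Spec_get_example_for_operations_py (operations : List String) (operand_min : Int) (operand_max : Int) (out : String) : Prop := out = get_example_for_operations_py_alt operations operand_min operand_max
instance (operations : List String) (operand_min : Int) (operand_max : Int) (out : String) : Decidable (Spec_get_example_for_operations_py operations operand_min operand_max out) := by unfold Spec_get_example_for_operations_py; infer_instance

-- ===== CLAIM =====
def Claim_equal_get_example_for_operations_py : Prop := ∀ (operations : List String) (operand_min : Int) (operand_max : Int), Dom_get_example_for_operations_py operations operand_min operand_max → Spec_get_example_for_operations_py operations operand_min operand_max (get_example_for_operations_py operations operand_min operand_max)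

-- ===== LEMMAS AND PROOFS =====

-- first element of the filtered list = first match
theorem pv_filter_head_eq_find (l : List String) :
    (match l.filter (fun op => op != "brackets") with
      | [] => "addition"
      | x :: _ => x) = (l.find? (fun o => o != "brackets")).getD "addition" := by
  induction l with
  | nil => rfl
  | cons x xs ih =>
    by_cases h : (x != "brackets") = true
    · simp [h]
    · simp only [List.filter_cons, List.find?_cons, h]
      simpa using ih

-- for every op string, A's branch equals the rendered table row
theorem pv_branch_eq_render (op : String) (lo hi : Int) :
    (if op == "addition" then
      let a := max lo (min 10 hi)
      let b := max lo (min 8 hi)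
      "{\"question\": \"Maya has " ++ PySem.Int.toStr a ++ " toys. Her friend gives her " ++ PySem.Int.toStr b ++ " more. How many toys does Maya have now?\", \"expression\": \"" ++ PySem.Int.toStr a ++ " + " ++ PySem.Int.toStr b ++ "\", \"answer\": " ++ PySem.Int.toStr (a + b) ++ "}"
    else if op == "subtraction" then
      let a := max lo (min 15 hi)
      let b := max lo (min 7 hi)
      "{\"question\": \"There are " ++ PySem.Int.toStr a ++ " birds on a tree. " ++ PySem.Int.toStr b ++ " birds fly away. How many birds are left?\", \"expression\": \"" ++ PySem.Int.toStr a ++ " - " ++ PySem.Int.toStr b ++ "\", \"answer\": " ++ PySem.Int.toStr (a - b) ++ "}"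
    else if op == "multiplication" then
      let a := max lo (min 8 hi)
      let b := max lo (min 6 hi)
      "{\"question\": \"Each basket has " ++ PySem.Int.toStr a ++ " apples. There are " ++ PySem.Int.toStr b ++ " baskets. How many apples in total?\", \"expression\": \"" ++ PySem.Int.toStr a ++ " × " ++ PySem.Int.toStr b ++ "\", \"answer\": " ++ PySem.Int.toStr (a * b) ++ "}"
    else if op == "three_addend" then
      let a := max lo (min 5 hi)
      let b := max lo (min 4 hi)
      let c := max lo (min 3 hi)
      "{\"question\": \"John has " ++ PySem.Int.toStr a ++ " red balls, " ++ PySem.Int.toStr b ++ " blue balls, and " ++ PySem.Int.toStr c ++ " yellow balls. How many balls does John have?\", \"expression\": \"" ++ PySem.Int.toStr a ++ " + " ++ PySem.Int.toStr b ++ " + " ++ PySem.Int.toStr c ++ "\", \"answer\": " ++ PySem.Int.toStr (a + b + c) ++ "}"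
    else if op == "missing_addend" then
      let answer := max lo (min 10 hi)
      let a := max lo (min 6 hi)
      let unknown := max 0 (answer - a)
      "{\"question\": \"Sarah has some candies. She gets " ++ PySem.Int.toStr a ++ " more candies and now has " ++ PySem.Int.toStr answer ++ " total. How many candies did she have at first?\", \"expression\": \"□ + " ++ PySem.Int.toStr a ++ " = " ++ PySem.Int.toStr answer ++ "\", \"answer\": " ++ PySem.Int.toStr unknown ++ "}"
    else
      "{\"question\": \"Tom has 2 apples. He gets 2 more. How many apples does Tom have?\", \"expression\": \"2 + 2\", \"answer\": 4}")
    = pvRender (((pvTable.find? (fun p => p.1 == op)).map Prod.snd).getD pvDefaultRow) lo hi := by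
  by_cases h1 : op = "addition"
  · subst h1; simp [pvTable, pvRender, List.foldl]
  · by_cases h2 : op = "subtraction"
    · subst h2; simp [pvTable, pvRender, List.foldl]
    · by_cases h3 : op = "multiplication"
      · subst h3; simp [pvTable, pvRender, List.foldl]
      · by_cases h4 : op = "three_addend"
        · subst h4
          simp [pvTable, pvRender, List.foldl]
          congr 1
          ring
        · by_cases h5 : op = "missing_addend"
          · subst h5; simp [pvTable, pvRender, List.foldl]
          · have g1 : ("addition" == op) = false := by simp [Ne.symm h1]
            have g2 : ("subtraction" == op) = false := by simp [Ne.symm h2]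
            have g3 : ("multiplication" == op) = false := by simp [Ne.symm h3]
            have g4 : ("three_addend" == op) = false := by simp [Ne.symm h4]
            have g5 : ("missing_addend" == op) = false := by simp [Ne.symm h5]
            simp [pvTable, pvDefaultRow, pvRender, List.foldl, h1, h2, h3, h4, h5, g1, g2, g3, g4, g5]

-- ===== VERDICT =====
theorem get_example_for_operations_py_spec : Claim_equal_get_example_for_operations_py := by
  intro operations lo hi _
  show get_example_for_operations_py operations lo hi = get_example_for_operations_py_alt operations lo hi
  simp only [get_example_for_operations_py, get_example_for_operations_py_alt]
  rw [pv_filter_head_eq_find]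
  exact pv_branch_eq_render _ lo hi
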